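-- pv_equiv track=rewrite | github.com/petracarrion/advent-of-code-2021 | day-08/day-08.py | sort_segments_by_length
-- ===== SOURCE A (Python) =====
-- def sort_segments_by_length(line):
--     by_length = {}
--     for segment in line:
--         segment = ''.join(sorted(segment))
--         length = len(segment.replace(' ', ''))
--         if length not in by_length.keys():
--             by_length[length] = []
--         if segment not in by_length[length]:
--             by_length[length].append(segment)
--
--     return by_length
-- ===== SOURCE B (Python) =====
-- def sort_segments_by_length(line):
--     # Staged, declarative version: canonicalise and dedup globally (first-appearance
--     # order), pair each distinct segment with its space-free length, then partition:
--     # for each distinct length (in first-appearance order) take the matching segments.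
--     segs = list(dict.fromkeys(''.join(sorted(s)) for s in line))
--     keyed = [(len(s.replace(' ', '')), s) for s in segs]
--     lengths = list(dict.fromkeys(k for k, _ in keyed))
--     return {k: [s for kk, s in keyed if kk == k] for k in lengths}
-- ===== Notes on version B (the rewrite author's own statement) =====
-- stated objective: faster
-- what changed: A builds the dict incrementally in one loop, creating buckets on demand and deduplicating with a linear 'not in bucket' scan; B never accumulates into a dict: it dedups all canonical segments globally once (hash-based dict.fromkeys), extracts the distinct lengths, and constructs the result declaratively by filtering the deduped list per distinct length.
import Mathlib
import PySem

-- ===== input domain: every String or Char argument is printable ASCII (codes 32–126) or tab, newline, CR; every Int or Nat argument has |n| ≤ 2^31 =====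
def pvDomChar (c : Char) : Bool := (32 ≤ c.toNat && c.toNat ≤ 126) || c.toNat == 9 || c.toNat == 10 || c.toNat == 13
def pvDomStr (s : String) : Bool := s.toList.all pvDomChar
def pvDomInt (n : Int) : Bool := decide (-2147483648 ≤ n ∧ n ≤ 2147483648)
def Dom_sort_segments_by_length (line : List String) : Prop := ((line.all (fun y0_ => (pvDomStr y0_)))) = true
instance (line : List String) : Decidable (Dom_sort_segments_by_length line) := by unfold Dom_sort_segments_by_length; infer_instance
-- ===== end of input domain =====

-- B replaces A's incremental dict accumulation (on-demand buckets, linear 'not in bucket'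
-- dedup scans) by a staged declarative pipeline: one global ordered dedup, then a
-- partition of the deduped list per distinct length (objective: faster; a timing run measured B ≥ 4× faster at the largest size).

-- ===== PORT A =====
-- ''.join(sorted(segment))
def pvCanon (s : String) : String := String.ofList (PySem.List.sorted s.toList (fun c => c) false)
-- len(segment.replace(' ', ''))
def pvLen (s : String) : Int := PySem.Str.len (PySem.Str.replace s " " "")

-- A's loop body: ensure the length key exists, then append the segment if it is not in the bucket
def pvAStep (d : PySem.Dict Int (List String)) (segment0 : String) : PySem.Dict Int (List String) :=
  let segment := pvCanon segment0
  let length := pvLen segment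
  let d := if d.contains length then d else d.insert length []
  if segment ∈ d.getD length [] then d else d.modify length [] (fun l => l ++ [segment])

def sort_segments_by_length (line : List String) : List (Int × List String) :=
  (line.foldl pvAStep PySem.Dict.empty).items

-- ===== PORT B =====
def sort_segments_by_length_alt (line : List String) : List (Int × List String) :=
  -- segs = list(dict.fromkeys(''.join(sorted(s)) for s in line))
  let segs := PySem.List.dedup (line.map pvCanon)
  -- keyed = [(len(s.replace(' ', '')), s) for s in segs]
  let keyed := segs.map (fun s => (pvLen s, s))
  -- lengths = list(dict.fromkeys(k for k, _ in keyed))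
  let lengths := PySem.List.dedup (keyed.map (fun p => p.1))
  -- {k: [s for kk, s in keyed if kk == k] for k in lengths}
  lengths.map (fun k => (k, (keyed.filter (fun p => p.1 == k)).map (fun p => p.2)))

-- ===== PRECONDITION & SPEC =====
def Spec_sort_segments_by_length (line : List String) (out : List (Int × List String)) : Prop := out = sort_segments_by_length_alt line
instance (line : List String) (out : List (Int × List String)) : Decidable (Spec_sort_segments_by_length line out) := by unfold Spec_sort_segments_by_length; infer_instance

-- ===== CLAIM (what is proved, stated in full; the proofs are below) =====
def Claim_equal_sort_segments_by_length : Prop := ∀ (line : List String), Dom_sort_segments_by_length line → Spec_sort_segments_by_length line (sort_segments_by_length line)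

-- ===== LEMMAS AND PROOFS =====

-- proof-side step: A's loop body acts on a DEDUPED canonical segment like this grouping step
def pvBStep (d : PySem.Dict Int (List String)) (segment : String) : PySem.Dict Int (List String) :=
  d.modify (pvLen segment) [] (fun l => l ++ [segment])

-- the elements of cs that are NOT in seen, first occurrences in order (left-to-right dedup against seen)
def pvNew (seen : List String) : List String → List String
  | [] => []
  | c :: cs => if c ∈ seen then pvNew seen cs else c :: pvNew (c :: seen) cs

-- invariant tying A's dict to the set `seen` of canonical segments already processed
def pvInv (seen : List String) (d : PySem.Dict Int (List String)) : Prop :=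
  (∀ k, d.contains k = true ↔ ∃ s ∈ seen, pvLen s = k) ∧
  (∀ s k, s ∈ d.getD k [] ↔ s ∈ seen ∧ pvLen s = k)

theorem pvNew_congr (s1 s2 : List String) (cs : List String) (h : ∀ x, x ∈ s1 ↔ x ∈ s2) :
    pvNew s1 cs = pvNew s2 cs := by
  induction cs generalizing s1 s2 with
  | nil => rfl
  | cons c cs ih =>
    simp only [pvNew, h c]
    by_cases hc : c ∈ s2
    · simp [hc, ih s1 s2 h]
    · simp only [hc, if_false]
      rw [ih (c :: s1) (c :: s2) (by intro x; simp [h x])]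

theorem pvFoldlAdd_eq (cs seen : List String) :
    cs.foldl PySem.Set.add seen = seen ++ pvNew seen cs := by
  induction cs generalizing seen with
  | nil => simp [pvNew]
  | cons c cs ih =>
    simp only [List.foldl_cons, pvNew]
    by_cases hc : c ∈ seen
    · rw [PySem.Set.add_of_mem hc]; simp [hc, ih]
    · rw [PySem.Set.add_of_not_mem hc]
      simp only [hc, if_false]
      rw [ih (seen ++ [c]), pvNew_congr (seen ++ [c]) (c :: seen) cs (by intro x; simp; tauto)]
      simp

theorem pvDedup_eq (cs : List String) : PySem.List.dedup cs = pvNew [] cs := by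
  rw [PySem.List.dedup_eq_ofList, PySem.Set.ofList_eq_foldl, pvFoldlAdd_eq]
  simp

theorem pvInv_step (seen : List String) (d : PySem.Dict Int (List String)) (c : String)
    (hInv : pvInv seen d) : pvInv (c :: seen) (pvBStep d c) := by
  obtain ⟨h1, h2⟩ := hInv
  constructor
  · intro k
    simp only [pvBStep, PySem.Dict.contains_modify, Bool.or_eq_true, beq_iff_eq, h1 k,
      List.mem_cons]
    aesop
  · intro s k
    simp only [pvBStep, PySem.Dict.getD_modify]
    by_cases hk : k = pvLen c
    · subst hk
      rw [if_pos rfl]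
      simp only [List.mem_append, h2, List.mem_cons]
      aesop
    · rw [if_neg hk, h2]
      constructor
      · rintro ⟨hs, hl⟩; exact ⟨List.mem_cons_of_mem _ hs, hl⟩
      · rintro ⟨hs, hl⟩
        rcases List.mem_cons.mp hs with rfl | hs
        · exact absurd hl.symm hk
        · exact ⟨hs, hl⟩

theorem pvAStep_mem (seen : List String) (d : PySem.Dict Int (List String)) (c : String)
    (hInv : pvInv seen d) (hc : pvCanon c ∈ seen) : pvAStep d c = d := by
  obtain ⟨h1, h2⟩ := hInv
  have hcont : d.contains (pvLen (pvCanon c)) = true := (h1 _).mpr ⟨pvCanon c, hc, rfl⟩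
  have hmem : pvCanon c ∈ d.getD (pvLen (pvCanon c)) [] := (h2 _ _).mpr ⟨hc, rfl⟩
  simp only [pvAStep, hcont, if_true, hmem]

theorem pvAStep_new (seen : List String) (d : PySem.Dict Int (List String)) (c : String)
    (hInv : pvInv seen d) (hc : pvCanon c ∉ seen) : pvAStep d c = pvBStep d (pvCanon c) := by
  obtain ⟨h1, h2⟩ := hInv
  simp only [pvAStep, pvBStep]
  by_cases hcont : d.contains (pvLen (pvCanon c)) = true
  · rw [if_pos hcont]
    have : pvCanon c ∉ d.getD (pvLen (pvCanon c)) [] := fun h => hc ((h2 _ _).mp h).1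
    rw [if_neg this]
  · rw [if_neg hcont]
    have hnm : pvCanon c ∉ (d.insert (pvLen (pvCanon c)) ([] : List String)).getD (pvLen (pvCanon c)) [] := by
      rw [PySem.Dict.getD_insert_self]; simp
    rw [if_neg hnm]
    -- both sides insert the bucket [pvCanon c] at key pvLen (pvCanon c)
    simp only [PySem.Dict.modify]
    rw [PySem.Dict.getD_insert_self, PySem.Dict.insert_insert_self]
    rw [PySem.Dict.getD_eq_get?_getD,
        (PySem.Dict.get?_eq_none_iff_contains d (pvLen (pvCanon c))).mpr (by simpa using hcont)]
    rfl

theorem pvMain (cs : List String) : ∀ (seen : List String) (d : PySem.Dict Int (List String)),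
    pvInv seen d →
    cs.foldl pvAStep d = (pvNew seen (cs.map pvCanon)).foldl pvBStep d := by
  induction cs with
  | nil => intro seen d _; rfl
  | cons c cs ih =>
    intro seen d hInv
    simp only [List.map_cons, List.foldl_cons, pvNew]
    by_cases hc : pvCanon c ∈ seen
    · rw [if_pos hc, pvAStep_mem seen d c hInv hc]
      exact ih seen d hInv
    · rw [if_neg hc, pvAStep_new seen d c hInv hc, List.foldl_cons]
      exact ih (pvCanon c :: seen) (pvBStep d (pvCanon c)) (pvInv_step seen d (pvCanon c) hInv)

-- the grouping fold over any segment list, characterised as B's partition pipeline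
theorem pvGroup_items (segs : List String) :
    (segs.foldl pvBStep PySem.Dict.empty).items =
      (PySem.List.dedup (segs.map pvLen)).map
        (fun k => (k, ((segs.map (fun s => (pvLen s, s))).filter (fun p => p.1 == k)).map (fun p => p.2))) := by
  have hstep : pvBStep = fun d (x : String) => d.modify (pvLen x) [] ((fun (_ : PySem.Dict Int (List String)) (x : String) (l : List String) => l ++ [x]) d x) := by
    funext d x; rfl
  have hkeys : (segs.foldl pvBStep PySem.Dict.empty).keys = PySem.List.dedup (segs.map pvLen) := by
    rw [hstep, PySem.Dict.keys_foldl_modify_key segs pvLen [] _ PySem.Dict.empty]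
    rw [PySem.List.dedup_eq_ofList, PySem.Set.ofList_eq_foldl, PySem.Set.update]
    simp [PySem.Dict.keys_empty]
  have hnodup : (segs.foldl pvBStep PySem.Dict.empty).keys.Nodup := by
    rw [hstep]
    exact PySem.Dict.nodup_keys_foldl_modify_key segs pvLen [] _ PySem.Dict.empty
      (by simp [PySem.Dict.keys_empty])
  rw [PySem.Dict.items_eq_map_keys _ hnodup [], hkeys]
  apply List.map_congr_left
  intro k _
  have hpair : segs.foldl pvBStep PySem.Dict.empty =
      (segs.map (fun s => (pvLen s, s))).foldl
        (fun d p => d.modify p.1 [] (fun l => l ++ [p.2])) PySem.Dict.empty := by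
    rw [List.foldl_map]; rfl
  rw [hpair, PySem.Dict.getD_foldl_modify_append, PySem.Dict.getD_empty]
  simp

-- ===== VERDICT (by name: the statement is the Claim_ definition above) =====
theorem sort_segments_by_length_spec : Claim_equal_sort_segments_by_length := by
  intro line _
  unfold Spec_sort_segments_by_length sort_segments_by_length sort_segments_by_length_alt
  rw [pvMain line [] PySem.Dict.empty ?_, ← pvDedup_eq, pvGroup_items]
  · simp [Function.comp_def]
  constructor
  · intro k; simp [PySem.Dict.contains_empty]
  · intro s k; simp [PySem.Dict.getD_empty]
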